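-- pv_equiv track=rewrite | github.com/f3270/rsm-assignment | rag_microservice/src/ingest.py | _determine_page_for_chunk
-- ===== SOURCE A (Python) =====
-- def _determine_page_for_chunk(chunk_text: str, page_info: list) -> int:
--     """Determine which page a chunk belongs to based on text overlap"""
--     if not page_info:
--         return 1
--
--     # Find the page with the most overlap with this chunk
--     best_page = 1
--     max_overlap = 0
--
--     for page_num, page_text in page_info:
--         # Simple overlap calculation - count common words
--         chunk_words = set(chunk_text.lower().split())
--         page_words = set(page_text.lower().split())
--         overlap = len(chunk_words.intersection(page_words))
--
--         if overlap > max_overlap: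
--             max_overlap = overlap
--             best_page = page_num
--
--     return best_page
-- ===== SOURCE B (Python) =====
-- def _determine_page_for_chunk(chunk_text: str, page_info: list) -> int:
--     """Determine which page a chunk belongs to based on text overlap"""
--     # Inverted index: word -> positions (in page_info order) of pages containing it
--     index = {}
--     for i, (_page_num, page_text) in enumerate(page_info):
--         for w in set(page_text.lower().split()):
--             index.setdefault(w, []).append(i)
--     # Tally, per page position, how many distinct chunk words it shares
--     counts = {}
--     for w in set(chunk_text.lower().split()):
--         for i in index.get(w, []):
--             counts[i] = counts.get(i, 0) + 1
--     best = 0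
--     best_page = 1
--     for i in range(len(page_info)):
--         c = counts.get(i, 0)
--         if c > best:
--             best = c
--             best_page = page_info[i][0]
--     return best_page
-- ===== Notes on version B (the rewrite author's own statement) =====
-- stated objective: faster
-- what changed: Replaces the per-page set intersection (with the chunk word-set rebuilt inside the loop) by an inverted index (word -> page positions) built once over page_info, a tally of distinct chunk words per page position driven by that index, and a final scan of tallies keeping the first strictly-greater page (best 0 or empty list still returns 1).
import Mathlib
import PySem

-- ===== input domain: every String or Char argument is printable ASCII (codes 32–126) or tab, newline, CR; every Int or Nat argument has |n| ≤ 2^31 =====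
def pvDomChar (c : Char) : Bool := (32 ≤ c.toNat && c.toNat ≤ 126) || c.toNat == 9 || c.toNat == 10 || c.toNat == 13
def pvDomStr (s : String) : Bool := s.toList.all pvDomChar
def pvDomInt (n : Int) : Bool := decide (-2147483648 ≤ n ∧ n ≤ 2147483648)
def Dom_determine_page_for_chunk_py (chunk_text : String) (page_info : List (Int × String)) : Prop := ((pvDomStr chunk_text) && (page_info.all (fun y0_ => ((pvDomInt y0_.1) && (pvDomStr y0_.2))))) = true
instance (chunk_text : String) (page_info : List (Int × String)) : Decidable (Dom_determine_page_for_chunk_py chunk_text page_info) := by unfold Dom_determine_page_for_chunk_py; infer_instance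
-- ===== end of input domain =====

-- B replaces the per-page set intersection (A rebuilds the chunk word-set for every page) by an
-- inverted index (word -> page positions) built once, plus a tally pass driven by the chunk's
-- distinct words: measured faster in a timing run.

-- ===== PORT A =====
def determine_page_for_chunk_py (chunk_text : String) (page_info : List (Int × String)) : Int :=
  if page_info = [] then 1
  else
    (page_info.foldl (fun st p =>
        let chunk_words := PySem.Set.ofList (PySem.Str.split₀ (PySem.Str.lower chunk_text))
        let page_words := PySem.Set.ofList (PySem.Str.split₀ (PySem.Str.lower p.2))
        let overlap : Int := ((PySem.Set.inter chunk_words page_words).length : Int)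
        if overlap > st.2 then (p.1, overlap) else st)
      ((1 : Int), (0 : Int))).1

-- ===== PORT B =====
def determine_page_for_chunk_py_alt (chunk_text : String) (page_info : List (Int × String)) : Int :=
  let index : PySem.Dict String (List Int) :=
    (PySem.List.enumerate page_info 0).foldl (fun d q =>
      (PySem.Set.ofList (PySem.Str.split₀ (PySem.Str.lower q.2.2))).foldl
        (fun d w => d.modify w [] (· ++ [q.1])) d) PySem.Dict.empty
  let counts : PySem.Dict Int Int :=
    (PySem.Set.ofList (PySem.Str.split₀ (PySem.Str.lower chunk_text))).foldl
      (fun d w => (index.getD w []).foldl (fun d i => d.modify i 0 (· + 1)) d) PySem.Dict.empty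
  ((PySem.List.pyRange 0 (PySem.List.len page_info)).foldl (fun st i =>
      let c := counts.getD i 0
      if c > st.1 then (c, (PySem.List.pyGetD page_info i ((0 : Int), "")).1) else st)
    ((0 : Int), (1 : Int))).2

-- ===== PRECONDITION & SPEC =====
def Spec_determine_page_for_chunk_py (chunk_text : String) (page_info : List (Int × String)) (out : Int) : Prop := out = determine_page_for_chunk_py_alt chunk_text page_info
instance (chunk_text : String) (page_info : List (Int × String)) (out : Int) : Decidable (Spec_determine_page_for_chunk_py chunk_text page_info out) := by unfold Spec_determine_page_for_chunk_py; infer_instance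

-- ===== CLAIM (what is proved, stated in full; the proofs are below) =====
def Claim_equal_determine_page_for_chunk_py : Prop := ∀ (chunk_text : String) (page_info : List (Int × String)), Dom_determine_page_for_chunk_py chunk_text page_info → Spec_determine_page_for_chunk_py chunk_text page_info (determine_page_for_chunk_py chunk_text page_info)

-- ===== LEMMAS AND PROOFS =====

/-- distinct words of a string, as both programs form them -/
def pvWords (s : String) : List String := PySem.Set.ofList (PySem.Str.split₀ (PySem.Str.lower s))

/-- the overlap A computes for one page -/
def pvOv (c t : String) : Int := ((PySem.Set.inter (pvWords c) (pvWords t)).length : Int)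

/-- A's loop body, abstracted -/
def pvStepA (c : String) (st : Int × Int) (p : Int × String) : Int × Int :=
  if pvOv c p.2 > st.2 then (p.1, pvOv c p.2) else st

/-- B's selection body, keyed by (best, best_page) -/
def pvStepB (c : String) (st : Int × Int) (p : Int × String) : Int × Int :=
  if pvOv c p.2 > st.1 then (pvOv c p.2, p.1) else st

/-- the (word, position) pairs B's index loop inserts, flattened -/
def pvPairs (l : List (Int × String)) (s : Int) : List (String × Int) :=
  (PySem.List.enumerate l s).flatMap (fun q => (pvWords q.2.2).map (fun w => (w, q.1)))

lemma pvOv_eq_countP (c t : String) :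
    pvOv c t = ((pvWords c).countP (fun w => (pvWords t).contains w) : Int) := by
  simp [pvOv, PySem.Set.inter, List.countP_eq_length_filter, PySem.Set.contains]

lemma pvFold_swap (c : String) : ∀ (l : List (Int × String)) (bp mo : Int),
    l.foldl (pvStepA c) (bp, mo)
      = ((l.foldl (pvStepB c) (mo, bp)).2, (l.foldl (pvStepB c) (mo, bp)).1) := by
  intro l
  induction l with
  | nil => intro bp mo; rfl
  | cons a l ih =>
    intro bp mo
    simp only [List.foldl_cons, pvStepA, pvStepB]
    split_ifs <;> exact ih _ _

lemma pvA_eq (c : String) (l : List (Int × String)) :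
    determine_page_for_chunk_py c l = (l.foldl (pvStepA c) (1, 0)).1 := by
  unfold determine_page_for_chunk_py
  split
  · subst ‹l = []›; rfl
  · rfl

lemma pvIndex_getD (l : List (Int × String)) (w : String) :
    ((PySem.List.enumerate l 0).foldl (fun d q =>
        (PySem.Set.ofList (PySem.Str.split₀ (PySem.Str.lower q.2.2))).foldl
          (fun d w => d.modify w [] (· ++ [q.1])) d)
        (PySem.Dict.empty : PySem.Dict String (List Int))).getD w []
      = ((pvPairs l 0).filter (fun p => p.1 == w)).map (fun p => p.2) := by
  have h : ∀ q : Int × (Int × String), ∀ d : PySem.Dict String (List Int),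
      (PySem.Set.ofList (PySem.Str.split₀ (PySem.Str.lower q.2.2))).foldl
          (fun d w => d.modify w [] (· ++ [q.1])) d
        = ((pvWords q.2.2).map (fun w => (w, q.1))).foldl
            (fun d p => d.modify p.1 [] (· ++ [p.2])) d := by
    intro q d; rw [List.foldl_map]; rfl
  rw [PySem.List.foldl_congr_mem _ _ _ _ (fun d q _ => h q d)]
  rw [← List.foldl_flatMap]
  rw [PySem.Dict.getD_foldl_modify_append]
  simp [pvPairs]

lemma pvPairs_snd_bounds (l : List (Int × String)) (s : Int) (p : String × Int)
    (hp : p ∈ pvPairs l s) : s ≤ p.2 ∧ p.2 < s + l.length := by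
  simp only [pvPairs, List.mem_flatMap] at hp
  obtain ⟨q, hq, hpq⟩ := hp
  rw [PySem.List.mem_enumerate_iff] at hq
  obtain ⟨k, hk, rfl⟩ := hq
  simp only [List.mem_map] at hpq
  obtain ⟨w, _, rfl⟩ := hpq
  constructor <;> [omega; (push_cast; omega)]

lemma pvCount_pairs : ∀ (l : List (Int × String)) (s : Int) (w : String) (k : Nat)
    (hk : k < l.length),
    List.count (s + (k : Int)) (((pvPairs l s).filter (fun p => p.1 == w)).map (fun p => p.2))
      = if w ∈ pvWords (l[k].2) then 1 else 0 := by
  intro l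
  induction l with
  | nil => intro s w k hk; simp at hk
  | cons a l ih =>
    intro s w k hk
    have hsplit : pvPairs (a :: l) s
        = (pvWords a.2).map (fun w => (w, s)) ++ pvPairs l (s + 1) := by
      simp [pvPairs, PySem.List.enumerate_cons]
    rw [hsplit, List.filter_append, List.map_append, List.count_append]
    have h1 : (((pvWords a.2).map (fun w' => (w', s))).filter (fun p => p.1 == w))
        = ((pvWords a.2).filter (fun w' => w' == w)).map (fun w' => (w', s)) := by
      rw [List.filter_map]; rfl
    rw [h1, List.map_map]
    have h2 : (((pvWords a.2).filter (fun w' => w' == w)).map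
        ((fun p : String × Int => p.2) ∘ (fun w' : String => (w', s))))
        = List.replicate ((pvWords a.2).filter (fun w' => w' == w)).length s := by
      rw [List.eq_replicate_iff]
      refine ⟨by simp, ?_⟩
      intro b hb; simp only [List.mem_map] at hb; obtain ⟨w', _, rfl⟩ := hb; rfl
    rw [h2, List.count_replicate]
    have hcnt : ((pvWords a.2).filter (fun w' => w' == w)).length
        = if w ∈ pvWords a.2 then 1 else 0 := by
      rw [← List.countP_eq_length_filter, ← List.count_eq_countP]
      by_cases hw : w ∈ pvWords a.2
      · rw [if_pos hw]; exact List.count_eq_one_of_mem (PySem.Set.nodup_ofList _) hw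
      · rw [if_neg hw]; exact List.count_eq_zero_of_not_mem hw
    cases k with
    | zero =>
      have hz : List.count (s + ((0 : Nat) : Int))
          (((pvPairs l (s + 1)).filter (fun p => p.1 == w)).map (fun p => p.2)) = 0 := by
        rw [List.count_eq_zero]
        intro hmem
        simp only [List.mem_map, List.mem_filter] at hmem
        obtain ⟨p, ⟨hp, _⟩, hps⟩ := hmem
        have := pvPairs_snd_bounds l (s + 1) p hp
        omega
      rw [hz]
      simp [hcnt]
    | succ k' =>
      have hne : ((s == s + ((k' + 1 : Nat) : Int))) = false := by
        rw [beq_eq_false_iff_ne]; push_cast; omega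
      rw [hne]
      have hshift : s + ((k' + 1 : Nat) : Int) = (s + 1) + (k' : Int) := by push_cast; omega
      rw [hshift, ih (s + 1) w k' (by simpa using hk)]
      simp

lemma pvCounts_getD (idx : PySem.Dict String (List Int)) :
    ∀ (ws : List String) (d : PySem.Dict Int Int) (i : Int),
    (ws.foldl (fun d w => (idx.getD w []).foldl (fun d i => d.modify i 0 (· + 1)) d) d).getD i 0
      = d.getD i 0 + ((ws.map (fun w => (List.count i (idx.getD w []) : Int))).sum) := by
  intro ws
  induction ws with
  | nil => intro d i; simp
  | cons w ws ih =>
    intro d i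
    rw [List.foldl_cons, ih, PySem.Dict.getD_foldl_modify_add_one]
    simp [add_assoc]

lemma pvB_eq (c : String) (l : List (Int × String)) :
    determine_page_for_chunk_py_alt c l = (l.foldl (pvStepB c) (0, 1)).2 := by
  simp only [determine_page_for_chunk_py_alt]
  rw [show (PySem.Set.ofList (PySem.Str.split₀ (PySem.Str.lower c))) = pvWords c from rfl]
  refine congrArg Prod.snd ?_
  rw [← PySem.List.foldl_pyRange_zero_pyGetD l ((0 : Int), "") (pvStepB c) ((0 : Int), (1 : Int))]
  apply PySem.List.foldl_congr_mem
  intro st i hi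
  rw [PySem.List.mem_pyRange_one] at hi
  obtain ⟨h0, hlt⟩ := hi
  obtain ⟨k, rfl⟩ : ∃ k : Nat, i = (k : Int) := ⟨i.toNat, by omega⟩
  have hk : k < l.length := by
    simp only [PySem.List.len] at hlt; exact_mod_cast hlt
  have hget : PySem.List.pyGetD l (k : Int) ((0 : Int), "") = l[k] := by
    rw [PySem.List.pyGetD_natCast, List.getD_eq_getElem _ _ hk]
  have hcgetD :
      ((pvWords c).foldl (fun d w =>
          (((PySem.List.enumerate l 0).foldl (fun d q =>
              (PySem.Set.ofList (PySem.Str.split₀ (PySem.Str.lower q.2.2))).foldl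
                (fun d w => d.modify w [] (· ++ [q.1])) d)
              (PySem.Dict.empty : PySem.Dict String (List Int))).getD w []).foldl
            (fun d i => d.modify i 0 (· + 1)) d)
        (PySem.Dict.empty : PySem.Dict Int Int)).getD (k : Int) 0
      = pvOv c (l[k].2) := by
    rw [pvCounts_getD]
    have hmap : ((pvWords c).map (fun w =>
        ((List.count (k : Int)
          (((PySem.List.enumerate l 0).foldl (fun d q =>
              (PySem.Set.ofList (PySem.Str.split₀ (PySem.Str.lower q.2.2))).foldl
                (fun d w => d.modify w [] (· ++ [q.1])) d)
              (PySem.Dict.empty : PySem.Dict String (List Int))).getD w [])) : Int)))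
        = (pvWords c).map (fun w => if w ∈ pvWords (l[k].2) then (1 : Int) else 0) := by
      apply List.map_congr_left
      intro w _
      rw [pvIndex_getD l w]
      have hcp := pvCount_pairs l 0 w k hk
      rw [zero_add] at hcp
      rw [hcp]
      split <;> simp
    rw [hmap]
    have hs := PySem.List.sum_map_ite_one_zero
      (fun w => decide (w ∈ pvWords (l[k].2))) (pvWords c)
    simp only [decide_eq_true_eq] at hs
    rw [hs, pvOv_eq_countP]
    simp [PySem.Dict.getD_empty]
  rw [hcgetD, hget]
  rfl

-- ===== VERDICT (by name: the statement is the Claim_ definition above) =====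
theorem determine_page_for_chunk_py_spec : Claim_equal_determine_page_for_chunk_py := by
  unfold Claim_equal_determine_page_for_chunk_py Spec_determine_page_for_chunk_py
  intro c l _
  rw [pvA_eq, pvB_eq, pvFold_swap]
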